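-- pv_equiv track=rewrite | github.com/kw-idea/Parkinson-analysis | finger.py | count_tap_directions
-- ===== SOURCE A (Python) =====
-- def count_tap_directions(data):
--     tap_number = 0
--     prev_direction = None
--     tap_indices = []  # 태핑의 인덱스를 저장할 리스트
--
--     for index, item in enumerate(data):
--         direction = item.strip().split(" ")[0]
--
--         if direction != prev_direction:
--             tap_number += 1
--             tap_indices.append(index)  # 태핑 인덱스를 리스트에 추가
--
--         prev_direction = direction
--
--     return tap_number, tap_indices
-- ===== SOURCE B (Python) =====
-- from itertools import groupby
--
-- def count_tap_directions(data):
--     directions = [item.strip().split(" ")[0] for item in data]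
--     tap_indices = []
--     offset = 0
--     for _, run in groupby(directions):
--         tap_indices.append(offset)
--         offset += sum(1 for _ in run)
--     return len(tap_indices), tap_indices
-- ===== Notes on version B (the rewrite author's own statement) =====
-- stated objective: idiomatic
-- what changed: B first extracts the whole directions list, then walks it as runs of consecutive equal directions (itertools.groupby), recording each run's start offset, instead of A's element-by-element comparison against a prev sentinel.
import Mathlib
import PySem

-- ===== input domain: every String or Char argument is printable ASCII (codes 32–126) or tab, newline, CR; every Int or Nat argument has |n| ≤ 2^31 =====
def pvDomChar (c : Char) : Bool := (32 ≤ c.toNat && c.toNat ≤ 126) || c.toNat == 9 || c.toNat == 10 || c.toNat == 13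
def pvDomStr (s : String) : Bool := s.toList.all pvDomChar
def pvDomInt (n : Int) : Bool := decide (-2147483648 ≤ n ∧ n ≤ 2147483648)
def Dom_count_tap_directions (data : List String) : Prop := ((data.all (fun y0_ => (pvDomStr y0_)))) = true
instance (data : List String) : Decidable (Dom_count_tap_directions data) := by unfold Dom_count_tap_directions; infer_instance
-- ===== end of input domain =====

-- B re-decomposes A's prev-sentinel scan as: extract the directions list, then record the start offset of each run of consecutive equal directions (groupby); same O(n) cost, return value proved identical.

-- ===== PORT A =====
-- loop body of A's for-loop, extracted as a helper; state = (tap_number, prev_direction, tap_indices)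
def pvStepA (st : Int × Option String × List Int) (iw : Int × String) : Int × Option String × List Int :=
  -- direction = item.strip().split(" ")[0]; split? with sep " " ≠ "" always returns some nonempty list, so [0] is its head (exact)
  let direction := ((PySem.Str.split? (PySem.Str.strip iw.2) " ").getD []).headD ""
  if some direction ≠ st.2.1 then (st.1 + 1, some direction, st.2.2 ++ [iw.1])
  else (st.1, some direction, st.2.2)

def count_tap_directions (data : List String) : Int × List Int :=
  let r := (PySem.List.enumerate data 0).foldl pvStepA (0, none, [])
  (r.1, r.2.2)

-- ===== PORT B =====
-- direction extracted from one item (B's list comprehension body); split(" ") never returns [], so [0] is its head (exact)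
def pvDirOf (item : String) : String := ((PySem.Str.split? (PySem.Str.strip item) " ").getD []).headD ""

-- B's groupby loop: start offset of each maximal run of consecutive equal directions
def pvRunStarts (off : Int) : List String → List Int
  | [] => []
  | d :: rest =>
    off :: pvRunStarts (off + 1 + (rest.takeWhile (· == d)).length) (rest.dropWhile (· == d))
termination_by ds => ds.length
decreasing_by
  simp only [List.length_cons]
  exact Nat.lt_succ_of_le (List.length_dropWhile_le _ _)

def count_tap_directions_alt (data : List String) : Int × List Int :=
  let starts := pvRunStarts 0 (data.map pvDirOf)
  ((starts.length : Int), starts)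

-- ===== PRECONDITION & SPEC =====
def Spec_count_tap_directions (data : List String) (out : Int × List Int) : Prop := out = count_tap_directions_alt data
instance (data : List String) (out : Int × List Int) : Decidable (Spec_count_tap_directions data out) := by unfold Spec_count_tap_directions; infer_instance

-- ===== CLAIM (what is proved, stated in full; the proofs are below) =====
def Claim_equal_count_tap_directions : Prop := ∀ (data : List String), Dom_count_tap_directions data → Spec_count_tap_directions data (count_tap_directions data)

-- ===== LEMMAS AND PROOFS =====

-- reference form of A's scan: run starts of ds from index i given the previous direction
def pvStarts (i : Int) (prev : Option String) : List String → List Int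
  | [] => []
  | d :: rest =>
    if some d ≠ prev then i :: pvStarts (i + 1) (some d) rest
    else pvStarts (i + 1) (some d) rest

lemma pvStepA_eq (st : Int × Option String × List Int) (iw : Int × String) :
    pvStepA st iw =
      if some (pvDirOf iw.2) ≠ st.2.1 then (st.1 + 1, some (pvDirOf iw.2), st.2.2 ++ [iw.1])
      else (st.1, some (pvDirOf iw.2), st.2.2) := rfl

lemma foldA_eq (data : List String) : ∀ (i t : Int) (prev : Option String) (acc : List Int),
    ∃ p, (PySem.List.enumerate data i).foldl pvStepA (t, prev, acc)
      = (t + (pvStarts i prev (data.map pvDirOf)).length, p, acc ++ pvStarts i prev (data.map pvDirOf)) := by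
  induction data with
  | nil => intro i t prev acc; exact ⟨prev, by simp [PySem.List.enumerate_nil, pvStarts]⟩
  | cons x xs ih =>
    intro i t prev acc
    rw [PySem.List.enumerate_cons, List.foldl_cons, pvStepA_eq]
    by_cases h : some (pvDirOf x) ≠ prev
    · rw [if_pos h]
      obtain ⟨p, hp⟩ := ih (i + 1) (t + 1) (some (pvDirOf x)) (acc ++ [i])
      refine ⟨p, ?_⟩
      rw [hp]
      simp only [List.map_cons, pvStarts, if_pos h, List.length_cons, List.append_assoc,
        List.singleton_append]
      refine Prod.ext ?_ rfl
      push_cast; ring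
    · rw [if_neg h]
      rw [not_not] at h
      obtain ⟨p, hp⟩ := ih (i + 1) t (some (pvDirOf x)) acc
      refine ⟨p, ?_⟩
      rw [hp]
      simp [pvStarts, h]

-- pvStarts skips over a run of elements equal to the remembered direction
lemma pvStarts_skip_run (run : List String) (d : String) (h : ∀ x ∈ run, x = d) :
    ∀ (i : Int) (ys : List String),
    pvStarts i (some d) (run ++ ys) = pvStarts (i + run.length) (some d) ys := by
  induction run with
  | nil => intro i ys; simp
  | cons a as ih =>
    intro i ys
    have ha : a = d := h a (by simp)
    simp only [List.cons_append, pvStarts, ha]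
    rw [if_neg (by simp)]
    rw [ih (fun x hx => h x (by simp [hx])) (i + 1) ys]
    congr 1
    simp only [List.length_cons]
    push_cast; ring

-- when the next element differs from d (or the list is empty), the remembered direction d is irrelevant
lemma pvStarts_fresh (d : String) (ys : List String) (h : ∀ y, ys.head? = some y → y ≠ d) (i : Int) :
    pvStarts i (some d) ys = pvStarts i none ys := by
  cases ys with
  | nil => simp [pvStarts]
  | cons y ys' =>
    have hy : y ≠ d := h y rfl
    simp [pvStarts, hy]

lemma runStarts_eq_starts (ds : List String) : ∀ (i : Int),
    pvRunStarts i ds = pvStarts i none ds := by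
  induction hn : ds.length using Nat.strong_induction_on generalizing ds with
  | _ n ih =>
    cases ds with
    | nil => intro i; simp [pvRunStarts, pvStarts]
    | cons d rest =>
      intro i
      rw [pvRunStarts]
      have hlt : (rest.dropWhile (· == d)).length < n := by
        subst hn
        simp only [List.length_cons]
        exact Nat.lt_succ_of_le (List.length_dropWhile_le _ _)
      have hrun : ∀ x ∈ rest.takeWhile (· == d), x = d := by
        intro x hx
        have := List.mem_takeWhile_imp hx
        simpa using this
      have hhead : ∀ y, (rest.dropWhile (· == d)).head? = some y → y ≠ d := by
        intro y hy
        have := List.head?_dropWhile_not (p := (· == d)) (l := rest)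
        rw [hy] at this
        simpa using this
      rw [pvStarts, if_pos (by simp)]
      conv_rhs => rw [show rest = rest.takeWhile (· == d) ++ rest.dropWhile (· == d) from
        (List.takeWhile_append_dropWhile).symm]
      rw [pvStarts_skip_run _ d hrun, pvStarts_fresh d _ hhead,
        ih _ hlt _ rfl]

-- ===== VERDICT (by name: the statement is the Claim_ definition above) =====
theorem count_tap_directions_spec : Claim_equal_count_tap_directions := by
  intro data _
  unfold Spec_count_tap_directions count_tap_directions count_tap_directions_alt
  obtain ⟨p, hp⟩ := foldA_eq data 0 0 none []
  rw [hp]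
  simp [runStarts_eq_starts]
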